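-- pv_equiv track=rewrite | github.com/aneesh-iyer29/codesheetreader | codesheetreader.py | xeno_process_word
-- ===== SOURCE A (Python) =====
-- def xeno_process_word(word, shift):
--     seen = set()
--     unique_letters = []
--     word = word.lower().replace(" ","")
--     for char in word:
--         if char not in seen:
--             unique_letters.append(char)
--             seen.add(char)
--
--     alphabet = set('abcdefghijklmnopqrstuvwxyz')
--
--     unused_letters = sorted(alphabet - seen)
--
--     # Add 'ñ' in its alphabetical position (after 'n', before 'o') if not in seen
--     if 'ñ' not in seen:
--         # Find the position where 'o' is (or would be) and insert 'ñ' before it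
--         if 'o' in unused_letters:
--             o_index = unused_letters.index('o')
--             unused_letters.insert(o_index, 'ñ')
--         else:
--             # If 'o' is not in unused_letters, find where it should be inserted
--             # 'ñ' should come after 'n', so find the first letter after 'n'
--             for i, letter in enumerate(unused_letters):
--                 if letter > 'n':
--                     unused_letters.insert(i, 'ñ')
--                     break
--             else:
--                 # If all letters are before 'n', append 'ñ' at the end
--                 unused_letters.append('ñ')
--
--     result = ''.join(unique_letters) + ''.join(unused_letters)
--
--     shift = shift % len(result)
--
--     shifted_result = result[-shift:] + result[:-shift]
--     return shifted_result
-- ===== SOURCE B (Python) =====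
-- _REF = "abcdefghijklmn" + "\u00f1" + "opqrstuvwxyz"  # 27 letters with 'ñ' in alphabetical position
--
-- def xeno_process_word(word, shift):
--     word = word.lower().replace(" ", "")
--     prefix = "".join(dict.fromkeys(word))
--     result = prefix + "".join(c for c in _REF if c not in prefix)
--     shift %= len(result)
--     return result[-shift:] + result[:-shift]
-- ===== Notes on version B (the rewrite author's own statement) =====
-- stated objective: simpler
-- what changed: Replaces the seen-set accumulation loop with dict.fromkeys dedup and collapses set-difference + sorted + the three-branch 'ñ' insertion (index/insert/for-else) into a single ordered filter over a fixed 27-letter reference alphabet.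
import Mathlib
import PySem

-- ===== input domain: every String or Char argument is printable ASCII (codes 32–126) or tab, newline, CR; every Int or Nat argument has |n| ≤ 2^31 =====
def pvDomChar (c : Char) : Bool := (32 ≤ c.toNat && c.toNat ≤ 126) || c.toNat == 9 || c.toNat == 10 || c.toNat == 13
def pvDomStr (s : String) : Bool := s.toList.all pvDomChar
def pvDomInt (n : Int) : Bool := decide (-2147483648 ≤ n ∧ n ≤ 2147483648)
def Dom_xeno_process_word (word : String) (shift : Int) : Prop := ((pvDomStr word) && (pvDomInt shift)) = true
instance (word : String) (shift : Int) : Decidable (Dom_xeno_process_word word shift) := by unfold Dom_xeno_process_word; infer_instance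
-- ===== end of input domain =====

-- B replaces A's set-difference + sort + three-branch 'ñ' insertion with one ordered filter
-- over a fixed 27-letter reference alphabet (objective: simpler); return values proved equal on Dom.

set_option maxRecDepth 100000

-- ===== PORT A =====
-- the "for i, letter in enumerate(unused_letters): if letter > 'n': insert; break / else: append" loop
def xenoForElse (ul : List Char) (i : Nat) (orig : List Char) : List Char :=
  match ul with
  | [] => orig ++ ['ñ']
  | letter :: rest =>
      if 'n' < letter then PySem.List.insert orig (i : Int) 'ñ'
      else xenoForElse rest (i + 1) orig

def xeno_process_word (word : String) (shift : Int) : String :=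
  let w := PySem.Chars.replace (PySem.Chars.lower word.toList) [' '] []
  let st := w.foldl (fun (st : PySem.Set Char × List Char) char =>
      if PySem.Set.contains st.1 char then st
      else (PySem.Set.add st.1 char, st.2 ++ [char])) (PySem.Set.empty, [])
  let seen := st.1
  let unique_letters := st.2
  let alphabet : PySem.Set Char := PySem.Set.ofList "abcdefghijklmnopqrstuvwxyz".toList
  let unused := PySem.List.sorted (PySem.Set.diff alphabet seen) (fun c => c) false
  let unused :=
    if !(PySem.Set.contains seen 'ñ') then
      if unused.contains 'o' then
        PySem.List.insert unused (((PySem.List.index? unused 'o').getD 0 : Nat) : Int) 'ñ'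
      else xenoForElse unused 0 unused
    else unused
  let result := unique_letters ++ unused
  let shift2 := PySem.Int.mod shift (result.length : Int)
  String.ofList (PySem.List.slice result (some (-shift2)) none ++
                 PySem.List.slice result none (some (-shift2)))

-- ===== PORT B =====
def xenoRef : List Char := "abcdefghijklmnñopqrstuvwxyz".toList

def xeno_process_word_alt (word : String) (shift : Int) : String :=
  let w := PySem.Chars.replace (PySem.Chars.lower word.toList) [' '] []
  let pfx := PySem.List.dedup w
  let result := pfx ++ xenoRef.filter (fun c => !(pfx.contains c))
  let k := PySem.Int.mod shift (result.length : Int)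
  String.ofList (PySem.List.slice result (some (-k)) none ++
                 PySem.List.slice result none (some (-k)))

-- ===== PRECONDITION & SPEC =====
def Spec_xeno_process_word (word : String) (shift : Int) (out : String) : Prop := out = xeno_process_word_alt word shift
instance (word : String) (shift : Int) (out : String) : Decidable (Spec_xeno_process_word word shift out) := by unfold Spec_xeno_process_word; infer_instance

-- ===== CLAIM (what is proved, stated in full; the proofs are below) =====
def Claim_equal_xeno_process_word : Prop := ∀ (word : String) (shift : Int), Dom_xeno_process_word word shift → Spec_xeno_process_word word shift (xeno_process_word word shift)

-- ===== LEMMAS AND PROOFS =====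

def xpPre : List Char := "abcdefghijklmn".toList
def xpPost : List Char := "opqrstuvwxyz".toList

-- A's dedup loop keeps the two components of its state equal (both are the running set-list)
theorem xenoFold (l : List Char) : ∀ (s : List Char),
    l.foldl (fun (st : PySem.Set Char × List Char) char =>
      if PySem.Set.contains st.1 char then st
      else (PySem.Set.add st.1 char, st.2 ++ [char])) (s, s)
    = (PySem.Set.update s l, PySem.Set.update s l) := by
  induction l with
  | nil => intro s; simp [PySem.Set.update]
  | cons c t ih =>
    intro s
    have hupd : PySem.Set.update s (c :: t) = PySem.Set.update (PySem.Set.add s c) t := by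
      simp [PySem.Set.update]
    rw [List.foldl_cons, hupd]
    by_cases h : PySem.Set.contains s c = true
    · have hm : c ∈ s := by simpa [PySem.Set.contains] using h
      have ha : PySem.Set.add s c = s := by simp [PySem.Set.add, hm]
      simp only [h, if_pos]
      rw [ha]
      exact ih _
    · simp only [Bool.not_eq_true] at h
      have hm : c ∉ s := by simpa [PySem.Set.contains] using h
      have ha : PySem.Set.add s c = s ++ [c] := by simp [PySem.Set.add, hm]
      simp only [h, Bool.false_eq_true, if_false]
      rw [ha]
      exact ih _

-- every character produced by replace(old, "") comes from the input (new = [] here)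
theorem go_mem (old new : List Char) : ∀ (fuel : Nat) (l acc : List Char) (x : Char),
    x ∈ PySem.Chars.replace.go old new fuel l acc → x ∈ new ∨ x ∈ l ∨ x ∈ acc := by
  intro fuel
  induction fuel with
  | zero =>
    intro l acc x h
    rw [PySem.Chars.replace.go] at h
    simp at h
    tauto
  | succ n ih =>
    intro l acc x h
    cases l with
    | nil =>
      rw [PySem.Chars.replace.go] at h
      · simp at h
        tauto
      · omega
    | cons c t =>
      rw [PySem.Chars.replace.go] at h
      by_cases hp : old.isPrefixOf (c :: t) = true
      · rw [if_pos hp] at h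
        rcases ih _ _ _ h with h1 | h2 | h3
        · exact Or.inl h1
        · exact Or.inr (Or.inl (List.mem_of_mem_drop h2))
        · rcases List.mem_append.mp h3 with h4 | h5
          · exact Or.inl (List.mem_reverse.mp h4)
          · exact Or.inr (Or.inr h5)
      · rw [if_neg hp] at h
        rcases ih _ _ _ h with h1 | h2 | h3
        · exact Or.inl h1
        · exact Or.inr (Or.inl (List.mem_cons_of_mem _ h2))
        · rcases List.mem_cons.mp h3 with h4 | h5
          · exact Or.inr (Or.inl (h4 ▸ List.mem_cons_self))
          · exact Or.inr (Or.inr h5)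

-- lowercasing a printable-ASCII/whitespace character never yields 'ñ'
theorem lowerChar_ne_ntilde (c : Char) (hc : pvDomChar c = true) :
    PySem.Chars.lowerChar c ≠ 'ñ' := by
  simp only [PySem.Chars.lowerChar, PySem.Chars.isupper]
  split
  · rename_i hu
    simp only [Bool.and_eq_true, decide_eq_true_eq] at hu
    have hle : c.toNat ≤ 90 := Fin.mk_le_mk.mp hu.2
    intro he
    have h3 : (Char.ofNat (c.toNat + 32)).toNat = c.toNat + 32 := by
      unfold Char.ofNat
      rw [dif_pos (Or.inl (by omega : c.toNat + 32 < 55296))]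
      rfl
    rw [he] at h3
    have h4 : ('ñ').toNat = 241 := rfl
    omega
  · intro he
    rw [he] at hc
    revert hc
    decide

theorem ntilde_not_mem_w (word : String) (hd : (word.toList.all pvDomChar) = true) :
    'ñ' ∉ PySem.Chars.replace (PySem.Chars.lower word.toList) [' '] [] := by
  intro hmem
  rw [PySem.Chars.replace] at hmem
  simp only [List.isEmpty_cons, Bool.false_eq_true, if_false] at hmem
  rcases go_mem _ _ _ _ _ _ hmem with h1 | h2 | h3
  · simp at h1
  · simp only [PySem.Chars.lower, List.mem_map] at h2
    obtain ⟨c, hcm, hce⟩ := h2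
    have := List.all_eq_true.mp hd c hcm
    exact lowerChar_ne_ntilde c this hce
  · simp at h3

-- the for-else loop skips every leading letter ≤ 'n'
theorem xenoForElse_skip : ∀ (L1 : List Char), (∀ c ∈ L1, ¬ 'n' < c) →
    ∀ (L2 : List Char) (i : Nat) (orig : List Char),
    xenoForElse (L1 ++ L2) i orig = xenoForElse L2 (i + L1.length) orig := by
  intro L1
  induction L1 with
  | nil => intro _ L2 i orig; simp
  | cons c t ih =>
    intro h L2 i orig
    have hc : ¬ 'n' < c := h c List.mem_cons_self
    rw [List.cons_append, xenoForElse, if_neg hc,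
        ih (fun d hd => h d (List.mem_cons_of_mem _ hd)) L2 (i + 1) orig]
    congr 1
    simp
    omega

-- the heart: A's sorted set-difference + 'ñ' insertion equals one ordered filter of xenoRef
theorem xenoCore (S unused : List Char) (hn : S.contains 'ñ' = false)
    (hu : unused = PySem.List.sorted (PySem.Set.diff (PySem.Set.ofList "abcdefghijklmnopqrstuvwxyz".toList) S) (fun c => c) false) :
    (if unused.contains 'o' then
       PySem.List.insert unused (((PySem.List.index? unused 'o').getD 0 : Nat) : Int) 'ñ'
     else xenoForElse unused 0 unused)
    = xenoRef.filter (fun c => !(S.contains c)) := by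
  subst hu
  have halpha : (PySem.Set.ofList "abcdefghijklmnopqrstuvwxyz".toList : List Char) = xpPre ++ xpPost := by decide
  set p : Char → Bool := fun c => !(S.contains c) with hp
  have hdiff : PySem.Set.diff (PySem.Set.ofList "abcdefghijklmnopqrstuvwxyz".toList) S = (xpPre ++ xpPost).filter p := by
    rw [halpha]; rfl
  have hpair : ((xpPre ++ xpPost).filter p).Pairwise (fun a b : Char => a ≤ b) :=
    (List.Pairwise.filter p (by decide : (xpPre ++ xpPost).Pairwise (· < ·))).imp le_of_lt
  have hsorted : PySem.List.sorted ((xpPre ++ xpPost).filter p) (fun c => c) false = (xpPre ++ xpPost).filter p :=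
    PySem.List.sorted_eq_self_of_pairwise _ _ hpair
  simp only [hdiff, hsorted]
  rw [List.filter_append]
  have hnm : 'ñ' ∉ S := by simpa using hn
  have hpn : p 'ñ' = true := by simp [hp, hnm]
  have href : xenoRef.filter p = xpPre.filter p ++ 'ñ' :: xpPost.filter p := by
    have : xenoRef = xpPre ++ 'ñ' :: xpPost := by decide
    rw [this, List.filter_append, List.filter_cons, if_pos hpn]
  have hoPre : 'o' ∉ xpPre.filter p := by
    intro h
    have := List.mem_of_mem_filter h
    revert this; decide
  by_cases ho : p 'o' = true
  · -- 'o' survives the filter: it heads the filtered xpPost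
    have hpost : xpPost.filter p = 'o' :: ("pqrstuvwxyz".toList).filter p := by
      have : xpPost = 'o' :: "pqrstuvwxyz".toList := by decide
      rw [this, List.filter_cons, if_pos ho]
    have hcont : (xpPre.filter p ++ xpPost.filter p).contains 'o' = true := by
      simp [hpost]
    rw [if_pos hcont]
    have hidx : PySem.List.index? (xpPre.filter p ++ xpPost.filter p) 'o' = some (xpPre.filter p).length := by
      rw [PySem.List.index?_eq_some_iff]
      exact ⟨xpPre.filter p, ("pqrstuvwxyz".toList).filter p, by rw [hpost], rfl, hoPre⟩
    rw [hidx]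
    simp only [Option.getD_some]
    rw [PySem.List.insert_natCast _ _ _ (by simp),
        List.take_left, List.drop_left, href, hpost]
  · -- 'o' filtered out: the for-else loop inserts before the first letter > 'n'
    have ho' : p 'o' = false := by simpa using ho
    have hoPost : 'o' ∉ xpPost.filter p := by
      intro hmem
      have := List.of_mem_filter hmem
      rw [ho'] at this; exact Bool.false_ne_true this
    have hnotmem : 'o' ∉ xpPre.filter p ++ xpPost.filter p := by
      intro h
      rcases List.mem_append.mp h with h | h
      · exact hoPre h
      · exact hoPost h
    rw [if_neg (by simp [List.contains_eq_mem, hnotmem])]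
    have hpreN' : xpPre.all (fun c => !(decide ('n' < c))) = true := by decide
    have h1 : ∀ c ∈ xpPre.filter p, ¬ 'n' < c := fun c hc => by
      simpa using List.all_eq_true.mp hpreN' c (List.mem_of_mem_filter hc)
    rw [xenoForElse_skip _ h1 _ 0 _, Nat.zero_add]
    cases hL2 : xpPost.filter p with
    | nil =>
      rw [xenoForElse]
      rw [href, hL2]
      simp
    | cons c rest =>
      have hpostN' : xpPost.all (fun c => decide ('n' < c)) = true := by decide
      have hcmem : c ∈ xpPost := List.mem_of_mem_filter (hL2 ▸ List.mem_cons_self)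
      have hgt : 'n' < c := by
        simpa using List.all_eq_true.mp hpostN' c hcmem
      rw [xenoForElse, if_pos hgt,
          PySem.List.insert_natCast _ _ _ (by simp),
          List.take_left, List.drop_left, href, hL2]

-- ===== VERDICT (by name: the statement is the Claim_ definition above) =====
theorem xeno_process_word_spec : Claim_equal_xeno_process_word := by
  intro word shift hdom
  unfold Spec_xeno_process_word
  have hdw : (word.toList.all pvDomChar) = true := by
    unfold Dom_xeno_process_word pvDomStr at hdom
    cases h : word.toList.all pvDomChar with
    | true => rfl
    | false => rw [h] at hdom; simp at hdom
  have hnw : 'ñ' ∉ PySem.Chars.replace (PySem.Chars.lower word.toList) [' '] [] :=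
    ntilde_not_mem_w word hdw
  set w := PySem.Chars.replace (PySem.Chars.lower word.toList) [' '] [] with hwdef
  have hinit : ((PySem.Set.empty : PySem.Set Char), ([] : List Char)) = (([] : List Char), ([] : List Char)) := rfl
  show xeno_process_word word shift = xeno_process_word_alt word shift
  simp only [xeno_process_word, xeno_process_word_alt, ← hwdef, hinit]
  rw [xenoFold w []]
  have hupd : PySem.Set.update ([] : List Char) w = PySem.Set.ofList w := by
    rw [PySem.Set.ofList_eq_foldl]; rfl
  rw [hupd]
  have hno : 'ñ' ∉ (PySem.Set.ofList w : List Char) := fun h => hnw ((PySem.Set.mem_ofList w 'ñ').mp h)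
  have hcontn : PySem.Set.contains (PySem.Set.ofList w) 'ñ' = false := by
    simpa [PySem.Set.contains, List.contains_eq_mem] using hno
  rw [hcontn]
  simp only [Bool.not_false, if_true]
  rw [xenoCore (PySem.Set.ofList w) _ hcontn rfl]
  simp [PySem.List.dedup_eq_ofList]
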